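-- pv_equiv track=rewrite | github.com/tepumasuta/Programming | Вдруг пригодится, пока не удаляю/Exercises/Ex. 3.py | dict_sort2
-- ===== SOURCE A (Python) =====
-- def dict_sort2(dictionary):
--     items = list(dictionary.items())
--     values = list(dictionary.values())
--     tmp_dict = {}
--
--     for key, value in items:
--         tmp_dict.setdefault(value, key)
--
--     values.sort()
--     output_dict = {}
--     for value in values:
--         output_dict.setdefault(tmp_dict.get(value), value)
--
--     return output_dict
-- ===== SOURCE B (Python) =====
-- def dict_sort2(dictionary):
--     output = {}
--     seen = set()
--     for key, value in sorted(dictionary.items(), key=lambda kv: kv[1]):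
--         if value not in seen:
--             seen.add(value)
--             output[key] = value
--     return output
-- ===== Notes on version B (the rewrite author's own statement) =====
-- stated objective: idiomatic
-- what changed: B stable-sorts the items once by value and emits each value's first (key, value) pair while tracking seen values, eliminating A's value-to-first-key index dict and its separate sort of the raw values list.
import Mathlib
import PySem

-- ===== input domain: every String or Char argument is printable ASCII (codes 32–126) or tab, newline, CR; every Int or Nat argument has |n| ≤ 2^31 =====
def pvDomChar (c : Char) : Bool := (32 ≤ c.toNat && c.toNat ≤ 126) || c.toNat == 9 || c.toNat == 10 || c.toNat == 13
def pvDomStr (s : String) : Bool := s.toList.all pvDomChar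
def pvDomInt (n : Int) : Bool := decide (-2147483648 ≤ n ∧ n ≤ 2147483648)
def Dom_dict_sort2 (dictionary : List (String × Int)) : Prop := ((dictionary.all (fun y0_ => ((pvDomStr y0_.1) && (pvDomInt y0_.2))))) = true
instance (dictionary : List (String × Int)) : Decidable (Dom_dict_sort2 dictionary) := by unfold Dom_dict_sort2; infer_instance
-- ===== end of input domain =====

-- B replaces A's value→first-key index dict + sort of the raw values list by one stable
-- sort of the items themselves (idiomatic; same asymptotic cost).

-- ===== PORT A =====
-- The Python parameter is a dict; the association list is read into a PySem.Dict first
-- (duplicate keys overwrite in place, exactly as a Python dict built from those pairs).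
-- `tmp_dict.get(value)` always hits (every sorted value is a key of tmp_dict), so the
-- `.getD ""` default below is unreachable; it only keeps the key of the declared type.
def dict_sort2 (dictionary : List (String × Int)) : List (String × Int) :=
  let d : PySem.Dict String Int := PySem.Dict.ofList dictionary
  let items : List (String × Int) := d.items
  let values : List Int := d.values
  let tmp_dict : PySem.Dict Int String :=
    items.foldl (fun t kv => t.setdefault kv.2 kv.1) PySem.Dict.empty
  let values' : List Int := PySem.List.sorted values (fun v => v) false
  let output_dict : PySem.Dict String Int :=
    values'.foldl (fun o v => o.setdefault ((tmp_dict.get? v).getD "") v) PySem.Dict.empty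
  output_dict.items

-- ===== PORT B =====
def dict_sort2_alt (dictionary : List (String × Int)) : List (String × Int) :=
  ((PySem.List.sorted (PySem.Dict.ofList dictionary).items (fun kv => kv.2) false).foldl
      (fun (st : PySem.Dict String Int × PySem.Set Int) kv =>
        if !(PySem.Set.contains st.2 kv.2) then (st.1.insert kv.1 kv.2, PySem.Set.add st.2 kv.2)
        else st)
      (PySem.Dict.empty, PySem.Set.empty)).1.items

-- ===== PRECONDITION & SPEC =====
def Spec_dict_sort2 (dictionary : List (String × Int)) (out : List (String × Int)) : Prop := out = dict_sort2_alt dictionary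
instance (dictionary : List (String × Int)) (out : List (String × Int)) : Decidable (Spec_dict_sort2 dictionary out) := by unfold Spec_dict_sort2; infer_instance

-- ===== CLAIM (what is proved, stated in full; the proofs are below) =====
def Claim_equal_dict_sort2 : Prop := ∀ (dictionary : List (String × Int)), Dom_dict_sort2 dictionary → Spec_dict_sort2 dictionary (dict_sort2 dictionary)

-- ===== LEMMAS AND PROOFS =====

-- A's first loop: the setdefault-fold maps each value to its FIRST key in `l`.
theorem tmp_get?_eq_find? (l : List (String × Int)) (t : PySem.Dict Int String) (v : Int) :
    (l.foldl (fun t kv => t.setdefault kv.2 kv.1) t).get? v =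
      (t.get? v).or ((l.find? (fun kv => kv.2 == v)).map Prod.fst) := by
  induction l generalizing t with
  | nil => simp
  | cons kv l ih =>
    simp only [List.foldl_cons, ih]
    by_cases hv : kv.2 = v
    · subst hv
      rw [List.find?_cons_of_pos (by simp), PySem.Dict.get?_setdefault_self]
      cases h : t.get? kv.2 <;> simp
    · rw [PySem.Dict.get?_setdefault_of_ne t kv.1 (show v ≠ kv.2 from fun h => hv h.symm),
        List.find?_cons_of_neg (by simp [hv])]

-- Stability of one insertion step of the sort, restricted to a fixed value.
theorem filter_insertBy_snd (x : String × Int) (acc : List (String × Int)) (v : Int)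
    (h : acc.Pairwise (fun a b => a.2 ≤ b.2)) :
    (PySem.List.insertBy (fun a b => decide (a.2 < b.2)) x acc).filter (fun a => a.2 == v) =
      acc.filter (fun a => a.2 == v) ++ (if x.2 == v then [x] else []) := by
  induction acc with
  | nil => by_cases hxv : x.2 = v <;> simp [PySem.List.insertBy, hxv]
  | cons y ys ih =>
    rw [PySem.List.insertBy]
    by_cases hb : x.2 < y.2
    · rw [if_pos (by simpa using hb)]
      by_cases hxv : x.2 = v
      · have hnil : (y :: ys).filter (fun a => a.2 == v) = [] := by
          rw [List.filter_eq_nil_iff]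
          intro a ha
          have hy : y.2 ≤ a.2 := by
            rcases List.mem_cons.1 ha with rfl | ha'
            · exact le_refl _
            · exact (List.pairwise_cons.1 h).1 a ha'
          simp only [beq_iff_eq]
          omega
        simp [hxv, hnil]
      · simp [List.filter_cons, hxv]
    · rw [if_neg (by simpa using hb)]
      rw [List.filter_cons, List.filter_cons, ih (List.pairwise_cons.1 h).2]
      by_cases hy : y.2 = v <;> simp [hy]

-- Stability of the whole sort, restricted to a fixed value.
theorem sorted_filter_snd (xs : List (String × Int)) (v : Int) :
    (PySem.List.sorted xs (fun kv => kv.2) false).filter (fun a => a.2 == v) =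
      xs.filter (fun a => a.2 == v) := by
  induction xs using List.reverseRecOn with
  | nil => rfl
  | append_singleton xs x ih =>
    have hstep : PySem.List.sorted (xs ++ [x]) (fun kv => kv.2) false =
        PySem.List.insertBy (fun a b => decide (a.2 < b.2)) x
          (PySem.List.sorted xs (fun kv => kv.2) false) := by
      rw [PySem.List.sorted_eq_foldl_insertBy, PySem.List.sorted_eq_foldl_insertBy,
        List.foldl_append, List.foldl_cons, List.foldl_nil]
    rw [hstep, filter_insertBy_snd x _ v (PySem.List.sorted_pairwise xs (fun kv => kv.2)), ih,
      List.filter_append, List.filter_cons, List.filter_nil]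

-- Stability, find? form: first pair with a given value is the same before and after sorting.
theorem sorted_find?_snd (xs : List (String × Int)) (v : Int) :
    (PySem.List.sorted xs (fun kv => kv.2) false).find? (fun a => a.2 == v) =
      xs.find? (fun a => a.2 == v) := by
  rw [← List.head?_filter, ← List.head?_filter, sorted_filter_snd]

-- Sorting the values list is mapping snd over the stable sort of the items by value.
theorem sorted_values_eq (l : List (String × Int)) :
    PySem.List.sorted (l.map (fun kv => kv.2)) (fun v => v) false =
      (PySem.List.sorted l (fun kv => kv.2) false).map (fun kv => kv.2) := by
  exact PySem.List.sorted_id_eq_of_perm_of_pairwise _ _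
    ((PySem.List.sorted_perm l (fun kv => kv.2) false).map _)
    (List.Pairwise.map _ (fun a b h => h) (PySem.List.sorted_pairwise l (fun kv => kv.2)))

-- The core loop correspondence: A's setdefault-fold over the sorted values equals the dict
-- component of B's seen-filtered insert-fold over the sorted items, provided keys are
-- distinct and f assigns every unseen value the key of its first pair in the list.
theorem main_fold (l : List (String × Int)) (f : Int → String)
    (O : PySem.Dict String Int) (seen : PySem.Set Int)
    (hk : (l.map Prod.fst).Nodup)
    (hI : ∀ v ∈ l.map Prod.snd, O.contains (f v) = PySem.Set.contains seen v)
    (hH : ∀ v ∈ l.map Prod.snd, PySem.Set.contains seen v = false →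
            l.find? (fun kv => kv.2 == v) = some (f v, v)) :
    (l.map Prod.snd).foldl (fun o v => o.setdefault (f v) v) O =
      (l.foldl
        (fun (st : PySem.Dict String Int × PySem.Set Int) kv =>
          if !(PySem.Set.contains st.2 kv.2) then (st.1.insert kv.1 kv.2, PySem.Set.add st.2 kv.2)
          else st)
        (O, seen)).1 := by
  induction l generalizing O seen with
  | nil => rfl
  | cons kv l ih =>
    have hmem : kv.2 ∈ (kv :: l).map Prod.snd := by simp
    by_cases hs : PySem.Set.contains seen kv.2 = true
    · -- value already seen: both sides skip
      have hOc : O.contains (f kv.2) = true := by rw [hI kv.2 hmem]; exact hs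
      have hc : (!(PySem.Set.contains seen kv.2)) = false := by rw [hs]; rfl
      simp only [List.map_cons, List.foldl_cons, hc, Bool.false_eq_true, if_false]
      rw [PySem.Dict.setdefault_of_contains _ _ hOc]
      refine ih O seen (List.nodup_cons.1 hk).2 ?_ ?_
      · intro v hv; exact hI v (List.mem_cons_of_mem _ hv)
      · intro v hv hvs
        have hvne : kv.2 ≠ v := by
          intro h; rw [← h] at hvs; rw [hvs] at hs; exact Bool.noConfusion hs
        have := hH v (List.mem_cons_of_mem _ hv) hvs
        rwa [List.find?_cons_of_neg (by simp [hvne])] at this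
    · -- value not yet seen: both sides append the pair (kv.1, kv.2)
      have hs' : PySem.Set.contains seen kv.2 = false := by
        cases h : PySem.Set.contains seen kv.2
        · rfl
        · exact absurd h hs
      have hf : f kv.2 = kv.1 := by
        have h1 := hH kv.2 hmem hs'
        rw [List.find?_cons_of_pos (by simp)] at h1
        exact (congrArg Prod.fst (Option.some.inj h1)).symm
      have hOc : O.contains (f kv.2) = false := by rw [hI kv.2 hmem]; exact hs'
      have hc : (!(PySem.Set.contains seen kv.2)) = true := by rw [hs']; rfl
      simp only [List.map_cons, List.foldl_cons, hc, if_pos]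
      rw [PySem.Dict.setdefault_of_not_contains _ _ hOc, hf]
      refine ih (O.insert kv.1 kv.2) (PySem.Set.add seen kv.2) (List.nodup_cons.1 hk).2 ?_ ?_
      · intro v hv
        by_cases hvseen : PySem.Set.contains seen v = true
        · -- already seen earlier: present on both sides
          have h1 : (O.insert kv.1 kv.2).contains (f v) = true := by
            rw [PySem.Dict.contains_insert, hI v (List.mem_cons_of_mem _ hv), hvseen]
            simp
          have h2 : PySem.Set.contains (PySem.Set.add seen kv.2) v = true := by
            rw [PySem.Set.contains_iff]
            exact (PySem.Set.mem_add seen kv.2 v).2 (Or.inl ((PySem.Set.contains_iff seen v).1 hvseen))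
          rw [h1, h2]
        · have hvs : PySem.Set.contains seen v = false := by
            cases h : PySem.Set.contains seen v
            · rfl
            · exact absurd h hvseen
          by_cases hveq : v = kv.2
          · -- v is exactly the value just inserted
            have h1 : (O.insert kv.1 kv.2).contains (f v) = true := by
              rw [hveq, hf, PySem.Dict.contains_insert]; simp
            have h2 : PySem.Set.contains (PySem.Set.add seen kv.2) v = true := by
              rw [PySem.Set.contains_iff]
              exact (PySem.Set.mem_add seen kv.2 v).2 (Or.inr hveq)
            rw [h1, h2]
          · -- genuinely new value still unseen: its first key differs from kv.1 (keys Nodup)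
            have hfind := hH v (List.mem_cons_of_mem _ hv) hvs
            have hpmem : (f v, v) ∈ kv :: l := List.mem_of_find?_eq_some hfind
            have hpmem' : (f v, v) ∈ l := by
              rcases List.mem_cons.1 hpmem with h | h
              · exact absurd (congrArg Prod.snd h) hveq
              · exact h
            have hfne : f v ≠ kv.1 := by
              intro h
              have : kv.1 ∈ l.map Prod.fst := by
                rw [← h]; exact List.mem_map_of_mem hpmem'
              exact (List.nodup_cons.1 hk).1 this
            have h1 : (O.insert kv.1 kv.2).contains (f v) = false := by
              rw [PySem.Dict.contains_insert, hI v (List.mem_cons_of_mem _ hv), hvs]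
              simp [hfne]
            have h2 : PySem.Set.contains (PySem.Set.add seen kv.2) v = false := by
              cases h : PySem.Set.contains (PySem.Set.add seen kv.2) v
              · rfl
              · exfalso
                rcases (PySem.Set.mem_add seen kv.2 v).1 ((PySem.Set.contains_iff _ v).1 h) with h' | h'
                · rw [(PySem.Set.contains_iff seen v).2 h'] at hvs; exact Bool.noConfusion hvs
                · exact hveq h'
            rw [h1, h2]
      · intro v hv hvs
        have hvs0 : PySem.Set.contains seen v = false := by
          cases h : PySem.Set.contains seen v
          · rfl
          · exfalso
            have : PySem.Set.contains (PySem.Set.add seen kv.2) v = true := by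
              rw [PySem.Set.contains_iff]
              exact (PySem.Set.mem_add seen kv.2 v).2 (Or.inl ((PySem.Set.contains_iff seen v).1 h))
            rw [this] at hvs; exact Bool.noConfusion hvs
        have hvne : kv.2 ≠ v := by
          intro h
          have : PySem.Set.contains (PySem.Set.add seen kv.2) v = true := by
            rw [PySem.Set.contains_iff]
            exact (PySem.Set.mem_add seen kv.2 v).2 (Or.inr h.symm)
          rw [this] at hvs; exact Bool.noConfusion hvs
        have := hH v (List.mem_cons_of_mem _ hv) hvs0
        rwa [List.find?_cons_of_neg (by simp [hvne])] at this

-- ===== VERDICT (by name: the statement is the Claim_ definition above) =====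
theorem dict_sort2_spec : Claim_equal_dict_sort2 := by
  intro dictionary _
  unfold Spec_dict_sort2 dict_sort2 dict_sort2_alt
  set its := (PySem.Dict.ofList dictionary).items with hits
  set tmp : PySem.Dict Int String :=
    its.foldl (fun t kv => t.setdefault kv.2 kv.1) PySem.Dict.empty with htmp
  set f : Int → String := fun v => (tmp.get? v).getD "" with hfdef
  set s := PySem.List.sorted its (fun kv => kv.2) false with hs
  have hvals : (PySem.Dict.ofList dictionary).values = its.map (fun kv => kv.2) := rfl
  have hsv : PySem.List.sorted ((PySem.Dict.ofList dictionary).values) (fun v => v) false =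
      s.map Prod.snd := by
    rw [hvals, sorted_values_eq]
  have hperm : s.Perm its := PySem.List.sorted_perm its (fun kv => kv.2) false
  have hk : (s.map Prod.fst).Nodup :=
    ((hperm.map Prod.fst).nodup_iff).2 (PySem.Dict.nodup_keys_ofList dictionary)
  have hH : ∀ v ∈ s.map Prod.snd, PySem.Set.contains PySem.Set.empty v = false →
      s.find? (fun kv => kv.2 == v) = some (f v, v) := by
    intro v hv _
    rw [hs, sorted_find?_snd]
    have hv' : v ∈ its.map Prod.snd := by
      have := (hperm.map Prod.snd).mem_iff.1 hv
      exact this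
    obtain ⟨p, hp, hpv⟩ := List.exists_of_mem_map hv'
    have hsome : (its.find? (fun kv => kv.2 == v)).isSome := by
      rw [List.find?_isSome]
      exact ⟨p, hp, by simp [hpv]⟩
    obtain ⟨q, hq⟩ := Option.isSome_iff_exists.1 hsome
    have hqv : q.2 = v := by
      have := List.find?_some hq
      simpa using this
    have hfv : f v = q.1 := by
      rw [hfdef]
      simp only
      rw [htmp, tmp_get?_eq_find?]
      simp [PySem.Dict.get?, PySem.Dict.empty, hq]
    rw [hq, hfv, ← hqv]
  have := main_fold s f PySem.Dict.empty PySem.Set.empty hk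
    (by intro v _; rfl) hH
  simp only [hsv]
  have hmapfold : (s.map Prod.snd).foldl
      (fun o v => o.setdefault ((tmp.get? v).getD "") v) PySem.Dict.empty =
      (s.map Prod.snd).foldl (fun o v => o.setdefault (f v) v) PySem.Dict.empty := rfl
  rw [hmapfold, this]
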